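-- pv_equiv track=rewrite | github.com/Princeton-IT-Services-Org/Princeton-Sentinel | worker/app/jobs/graph_ingest.py | _dedupe_drive_rows
-- ===== SOURCE A (Python) =====
-- from typing import Any, Callable, Dict, Hashable, Iterable, Optional, Tuple
--
-- def _merge_drive_rows(existing: tuple, new: tuple) -> tuple:
--     merged = list(existing)
--     for idx, value in enumerate(new):
--         if value is not None:
--             merged[idx] = value
--     return tuple(merged)
--
-- def _dedupe_drive_rows(rows: list[tuple]) -> tuple[list[tuple], int]:
--     if len(rows) < 2:
--         return rows, 0
--     merged_by_id: dict[Hashable, tuple] = {}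
--     dropped = 0
--     for row in rows:
--         drive_id = row[0]
--         if drive_id in merged_by_id:
--             merged_by_id[drive_id] = _merge_drive_rows(merged_by_id[drive_id], row)
--             dropped += 1
--         else:
--             merged_by_id[drive_id] = row
--     if dropped == 0:
--         return rows, 0
--     return list(merged_by_id.values()), dropped
-- ===== SOURCE B (Python) =====
-- def _merge_drive_rows(existing: tuple, new: tuple) -> tuple:
--     merged = list(existing)
--     for idx, value in enumerate(new):
--         if value is not None:
--             merged[idx] = value
--     return tuple(merged)
--
--
-- def _dedupe_drive_rows(rows: list[tuple]) -> tuple[list[tuple], int]: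
--     if len(rows) < 2:
--         return rows, 0
--     # phase 1: group rows by drive id, preserving first-seen key order
--     groups: dict = {}
--     for row in rows:
--         groups.setdefault(row[0], []).append(row)
--     dropped = len(rows) - len(groups)
--     if dropped == 0:
--         return rows, 0
--     # phase 2: reduce each group left-to-right into one merged row
--     deduped = []
--     for group in groups.values():
--         merged = group[0]
--         for row in group[1:]:
--             merged = _merge_drive_rows(merged, row)
--         deduped.append(merged)
--     return deduped, dropped
-- ===== Notes on version B (the rewrite author's own statement) =====
-- stated objective: alternative
-- what changed: A merges duplicates into the dict while scanning and counts dropped rows as it goes; B first groups rows by drive id into lists (order-preserving), then reduces each group left-to-right with _merge_drive_rows and computes dropped as len(rows) - number of groups.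
import Mathlib
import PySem

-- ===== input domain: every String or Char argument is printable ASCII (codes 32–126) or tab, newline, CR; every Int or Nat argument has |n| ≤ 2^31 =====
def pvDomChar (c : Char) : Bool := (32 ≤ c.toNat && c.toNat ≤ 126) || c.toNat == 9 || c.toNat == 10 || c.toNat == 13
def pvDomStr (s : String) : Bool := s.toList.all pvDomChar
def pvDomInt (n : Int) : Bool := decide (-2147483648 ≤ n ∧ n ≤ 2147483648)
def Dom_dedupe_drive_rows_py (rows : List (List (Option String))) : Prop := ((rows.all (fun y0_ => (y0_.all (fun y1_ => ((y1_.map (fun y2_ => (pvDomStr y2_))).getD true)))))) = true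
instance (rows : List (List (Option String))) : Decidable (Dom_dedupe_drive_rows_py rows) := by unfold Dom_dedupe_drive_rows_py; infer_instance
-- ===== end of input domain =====

-- B restructures A's single merge-as-you-go loop into two phases (group rows by id, then reduce
-- each group left-to-right); objective: alternative decomposition, same asymptotic cost.

-- ===== PORT A =====
-- _merge_drive_rows, shared verbatim by both Pythons (Source B contains the identical helper).
-- merged[idx] = value is ported with the total PySem.List.pySetD; Python's IndexError inputs are excluded by Pre_.
def mergeDriveRows (existing new_ : List (Option String)) : List (Option String) :=
  (PySem.List.enumerate new_).foldl
    (fun merged p =>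
      match p.2 with
      | some v => PySem.List.pySetD merged p.1 (some v)   -- if value is not None: merged[idx] = value
      | none => merged)
    existing

-- the body of A's 'for row in rows' loop (state: merged_by_id, dropped); row[0] ported with the
-- total PySem.List.pyGetD (empty rows are excluded by Pre_)
def dedupeStepA (st : PySem.Dict (Option String) (List (Option String)) × Int)
    (row : List (Option String)) : PySem.Dict (Option String) (List (Option String)) × Int :=
  let driveId := PySem.List.pyGetD row 0 none
  if st.1.contains driveId then
    (st.1.insert driveId (mergeDriveRows (st.1.getD driveId []) row), st.2 + 1)
  else
    (st.1.insert driveId row, st.2)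

def dedupe_drive_rows_py (rows : List (List (Option String))) : List (List (Option String)) × Int :=
  if rows.length < 2 then (rows, 0)
  else
    let st := rows.foldl dedupeStepA (PySem.Dict.empty, 0)
    if st.2 = 0 then (rows, 0)
    else (st.1.values, st.2)

-- ===== PORT B =====
-- the body of B's phase-1 grouping loop: groups.setdefault(row[0], []).append(row)
def dedupeGroupStep (g : PySem.Dict (Option String) (List (List (Option String))))
    (row : List (Option String)) : PySem.Dict (Option String) (List (List (Option String))) :=
  g.modify (PySem.List.pyGetD row 0 none) [] (· ++ [row])

-- B's phase-2 inner loop: merged = group[0]; for row in group[1:]: merged = _merge_drive_rows(merged, row)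
def mergeGroup (group : List (List (Option String))) : List (Option String) :=
  match group with
  | [] => []            -- unreachable: every group built by phase 1 is nonempty
  | h :: t => t.foldl mergeDriveRows h

def dedupe_drive_rows_py_alt (rows : List (List (Option String))) : List (List (Option String)) × Int :=
  if rows.length < 2 then (rows, 0)
  else
    let groups := rows.foldl dedupeGroupStep PySem.Dict.empty
    let dropped : Int := (rows.length : Int) - (groups.size : Int)
    if dropped = 0 then (rows, 0)
    else (groups.values.map mergeGroup, dropped)

-- ===== PRECONDITION & SPEC =====
-- Pre_ is exactly the set of inputs on which Python A returns normally: with ≥ 2 rows, every row must be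
-- nonempty (row[0] would raise IndexError) and, whenever a later row merges into a group, its non-None cells
-- must fit inside the first row of that group (merged[idx] = value would raise IndexError).
def Pre_dedupe_drive_rows_py (rows : List (List (Option String))) : Prop :=
  rows.length < 2 ∨
  ((∀ r ∈ rows, r ≠ []) ∧
   ∀ j ∈ List.range rows.length, ∀ i ∈ List.range j,
     PySem.List.pyGetD (rows.getD i []) 0 none = PySem.List.pyGetD (rows.getD j []) 0 none →
     (∀ m ∈ List.range i, PySem.List.pyGetD (rows.getD m []) 0 none ≠ PySem.List.pyGetD (rows.getD i []) 0 none) →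
     ∀ idx < (rows.getD j []).length, (rows.getD i []).length ≤ idx → (rows.getD j []).getD idx none = none)
instance (rows : List (List (Option String))) : Decidable (Pre_dedupe_drive_rows_py rows) := by
  unfold Pre_dedupe_drive_rows_py; infer_instance

def pvWitness_dedupe_drive_rows_py : List (List (Option String)) :=
  [[some "a", none], [some "a", some "x"], [some "b", some "y"]]

def Spec_dedupe_drive_rows_py (rows : List (List (Option String))) (out : List (List (Option String)) × Int) : Prop := out = dedupe_drive_rows_py_alt rows
instance (rows : List (List (Option String))) (out : List (List (Option String)) × Int) : Decidable (Spec_dedupe_drive_rows_py rows out) := by unfold Spec_dedupe_drive_rows_py; infer_instance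

-- ===== CLAIM (what is proved, stated in full; the proofs are below) =====
def Claim_equal_dedupe_drive_rows_py : Prop := ∀ (rows : List (List (Option String))), Dom_dedupe_drive_rows_py rows → Pre_dedupe_drive_rows_py rows → Spec_dedupe_drive_rows_py rows (dedupe_drive_rows_py rows)

-- ===== LEMMAS AND PROOFS =====

lemma mergeGroup_append (g : List (List (Option String))) (r : List (Option String)) (h : g ≠ []) :
    mergeGroup (g ++ [r]) = mergeDriveRows (mergeGroup g) r := by
  cases g with
  | nil => exact absurd rfl h
  | cons a t => simp [mergeGroup, List.foldl_append]

-- the coupling invariant between A's loop state and B's phase-1 state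
lemma fold_rel (rows : List (List (Option String)))
    (dA : PySem.Dict (Option String) (List (Option String))) (c : Int)
    (gB : PySem.Dict (Option String) (List (List (Option String))))
    (hnd : gB.keys.Nodup)
    (hit : dA.items = gB.items.map (fun p => (p.1, mergeGroup p.2)))
    (hne : ∀ p ∈ gB.items, p.2 ≠ []) :
    (rows.foldl dedupeStepA (dA, c)).1.items
        = (rows.foldl dedupeGroupStep gB).items.map (fun p => (p.1, mergeGroup p.2))
    ∧ (rows.foldl dedupeStepA (dA, c)).2
        = c + (rows.length : Int) - (((rows.foldl dedupeGroupStep gB).size : Int) - (gB.size : Int))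
    ∧ (rows.foldl dedupeGroupStep gB).keys.Nodup
    ∧ (∀ p ∈ (rows.foldl dedupeGroupStep gB).items, p.2 ≠ []) := by
  induction rows generalizing dA c gB with
  | nil =>
    refine ⟨by simpa using hit, by simp, by simpa using hnd, by simpa using hne⟩
  | cons r rest ih =>
    simp only [List.foldl_cons]
    have hkeys : dA.keys = gB.keys := by
      simp [PySem.Dict.keys, hit, List.map_map, Function.comp]
    have hndA : dA.keys.Nodup := by rw [hkeys]; exact hnd
    have hcont : dA.contains (PySem.List.pyGetD r 0 none)
        = gB.contains (PySem.List.pyGetD r 0 none) := by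
      rw [PySem.Dict.contains_eq_decide_mem_keys, PySem.Dict.contains_eq_decide_mem_keys, hkeys]
    by_cases hc : gB.contains (PySem.List.pyGetD r 0 none) = true
    · -- the drive id is already a key: A merges, B appends to the group
      obtain ⟨g, hg⟩ : ∃ g, gB.get? (PySem.List.pyGetD r 0 none) = some g := by
        have h := PySem.Dict.contains_eq_isSome_get? gB (PySem.List.pyGetD r 0 none)
        rw [hc] at h
        exact Option.isSome_iff_exists.1 h.symm
      have hgmem : (PySem.List.pyGetD r 0 none, g) ∈ gB.items :=
        PySem.Dict.mem_items_of_get?_eq_some gB hg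
      have hgne : g ≠ [] := hne _ hgmem
      have hgetB : gB.getD (PySem.List.pyGetD r 0 none) [] = g :=
        PySem.Dict.getD_of_get?_eq_some gB [] hg
      have hAmem : (PySem.List.pyGetD r 0 none, mergeGroup g) ∈ dA.items := by
        rw [hit]
        exact List.mem_map_of_mem hgmem
      have hgetA : dA.getD (PySem.List.pyGetD r 0 none) [] = mergeGroup g :=
        PySem.Dict.getD_of_mem_items dA hAmem hndA []
      have hcA : dA.contains (PySem.List.pyGetD r 0 none) = true := by rw [hcont]; exact hc
      have hstepA : dedupeStepA (dA, c) r
          = (dA.insert (PySem.List.pyGetD r 0 none)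
              (mergeDriveRows (mergeGroup g) r), c + 1) := by
        simp [dedupeStepA, hcA, hgetA]
      have hstepB : dedupeGroupStep gB r
          = gB.insert (PySem.List.pyGetD r 0 none) (g ++ [r]) := by
        simp [dedupeGroupStep, PySem.Dict.modify, hgetB]
      rw [hstepA, hstepB]
      have hit' : (dA.insert (PySem.List.pyGetD r 0 none) (mergeDriveRows (mergeGroup g) r)).items
          = (gB.insert (PySem.List.pyGetD r 0 none) (g ++ [r])).items.map
              (fun p => (p.1, mergeGroup p.2)) := by
        rw [PySem.Dict.items_insert_of_contains _ _ hcA,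
            PySem.Dict.items_insert_of_contains _ _ hc, hit, List.map_map, List.map_map]
        refine List.map_congr_left ?_
        intro q _
        by_cases hqk : q.1 = PySem.List.pyGetD r 0 none
        · simp [Function.comp, hqk, mergeGroup_append g r hgne]
        · simp [Function.comp, hqk]
      have hnd' : (gB.insert (PySem.List.pyGetD r 0 none) (g ++ [r])).keys.Nodup :=
        PySem.Dict.nodup_keys_insert gB _ _ hnd
      have hne' : ∀ p ∈ (gB.insert (PySem.List.pyGetD r 0 none) (g ++ [r])).items, p.2 ≠ [] := by
        intro p hp
        rcases (PySem.Dict.mem_items_insert gB _ _ p).1 hp with h | ⟨h, _⟩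
        · subst h; simp
        · exact hne _ h
      obtain ⟨h1, h2, h3, h4⟩ := ih _ (c + 1) _ hnd' hit' hne'
      refine ⟨h1, ?_, h3, h4⟩
      rw [h2]
      have hsz : (gB.insert (PySem.List.pyGetD r 0 none) (g ++ [r])).size = gB.size := by
        simp [PySem.Dict.size, PySem.Dict.items_insert_of_contains _ _ hc]
      rw [hsz]
      simp only [List.length_cons]
      push_cast
      ring
    · -- fresh drive id: both sides append a new entry
      have hc' : gB.contains (PySem.List.pyGetD r 0 none) = false := by simpa using hc
      have hcA : dA.contains (PySem.List.pyGetD r 0 none) = false := by rw [hcont]; exact hc'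
      have hgetB : gB.getD (PySem.List.pyGetD r 0 none) [] = [] :=
        PySem.Dict.getD_of_not_contains gB [] hc'
      have hstepA : dedupeStepA (dA, c) r
          = (dA.insert (PySem.List.pyGetD r 0 none) r, c) := by
        simp [dedupeStepA, hcA]
      have hstepB : dedupeGroupStep gB r
          = gB.insert (PySem.List.pyGetD r 0 none) [r] := by
        simp [dedupeGroupStep, PySem.Dict.modify, hgetB]
      rw [hstepA, hstepB]
      have hit' : (dA.insert (PySem.List.pyGetD r 0 none) r).items
          = (gB.insert (PySem.List.pyGetD r 0 none) [r]).items.map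
              (fun p => (p.1, mergeGroup p.2)) := by
        rw [PySem.Dict.items_insert_of_not_contains _ _ hcA,
            PySem.Dict.items_insert_of_not_contains _ _ hc', hit, List.map_append]
        simp [mergeGroup]
      have hnd' : (gB.insert (PySem.List.pyGetD r 0 none) [r]).keys.Nodup :=
        PySem.Dict.nodup_keys_insert gB _ _ hnd
      have hne' : ∀ p ∈ (gB.insert (PySem.List.pyGetD r 0 none) [r]).items, p.2 ≠ [] := by
        intro p hp
        rcases (PySem.Dict.mem_items_insert gB _ _ p).1 hp with h | ⟨h, _⟩
        · subst h; simp
        · exact hne _ h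
      obtain ⟨h1, h2, h3, h4⟩ := ih _ c _ hnd' hit' hne'
      refine ⟨h1, ?_, h3, h4⟩
      rw [h2]
      have hsz : (gB.insert (PySem.List.pyGetD r 0 none) [r]).size = gB.size + 1 := by
        simp [PySem.Dict.size, PySem.Dict.items_insert_of_not_contains _ _ hc']
      rw [hsz]
      simp only [List.length_cons]
      push_cast
      ring

-- ===== VERDICT (by name: the statement is the Claim_ definition above) =====
theorem dedupe_drive_rows_py_spec : Claim_equal_dedupe_drive_rows_py := by
  intro rows _ _
  unfold Spec_dedupe_drive_rows_py dedupe_drive_rows_py dedupe_drive_rows_py_alt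
  by_cases h2 : rows.length < 2
  · simp [h2]
  · simp only [h2, if_false]
    obtain ⟨h1, hdrop, -, -⟩ :=
      fold_rel rows PySem.Dict.empty 0 PySem.Dict.empty
        (by simp [PySem.Dict.keys, PySem.Dict.empty])
        (by simp [PySem.Dict.empty])
        (by simp [PySem.Dict.empty])
    have hd2 : (rows.foldl dedupeStepA (PySem.Dict.empty, 0)).2
        = (rows.length : Int) - ((rows.foldl dedupeGroupStep PySem.Dict.empty).size : Int) := by
      rw [hdrop]
      simp [PySem.Dict.size, PySem.Dict.empty]
    rw [hd2]
    by_cases hz : (rows.length : Int)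
        - ((rows.foldl dedupeGroupStep PySem.Dict.empty).size : Int) = 0
    · simp [hz]
    · simp only [hz, if_false]
      refine Prod.ext ?_ rfl
      simp [PySem.Dict.values, h1, List.map_map, Function.comp]
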